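-- pv_equiv track=rewrite | github.com/samikoz/pyfun | fun_intarray/subarray_divisible_by_size.py | find_divisible_subarray_by_pigeonhole_principle
-- ===== SOURCE A (Python) =====
-- def find_divisible_subarray_by_pigeonhole_principle(array):
--     """compute first len(array) simple subarray sums as in the first approach.
--     ether one of them is divisible by len(array) and we're done or two repeated in which case the difference works.
--     it's clear here that -1 is never obtained."""
--     length = len(array)
--     modulos_to_indices = {}
--     for upper_bound in range(1, len(array)+1):
--         current_remainder = sum(array[:upper_bound]) % length
--         if current_remainder == 0:
--             return array[:upper_bound]
--
--         if modulos_to_indices.get(current_remainder, -1) > -1: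
--             return array[modulos_to_indices.get(current_remainder)+1:upper_bound]
--         modulos_to_indices[current_remainder] = upper_bound-1
-- ===== SOURCE B (Python) =====
-- def find_divisible_subarray_by_pigeonhole_principle(array):
--     # One pass: maintain the running prefix-sum remainder instead of recomputing
--     # sum(array[:upper_bound]) at every step; seeding seen with {0: -1} merges the
--     # "remainder is zero" case into the "remainder already seen" case.
--     n = len(array)
--     seen = {0: -1}
--     remainder = 0
--     for i, x in enumerate(array):
--         remainder = (remainder + x) % n
--         if remainder in seen:
--             return array[seen[remainder] + 1:i + 1]
--         seen[remainder] = i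
-- ===== Notes on version B (the rewrite author's own statement) =====
-- stated objective: faster
-- what changed: B keeps a running prefix-sum remainder updated in O(1) per step (with the dict pre-seeded with {0:-1} so the zero-remainder case is the generic lookup) instead of recomputing sum(array[:upper_bound]) from scratch in every iteration.
-- outside the precondition, e.g. on find_divisible_subarray_by_pigeonhole_principle([]): A returns None, B returns None
import Mathlib
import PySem

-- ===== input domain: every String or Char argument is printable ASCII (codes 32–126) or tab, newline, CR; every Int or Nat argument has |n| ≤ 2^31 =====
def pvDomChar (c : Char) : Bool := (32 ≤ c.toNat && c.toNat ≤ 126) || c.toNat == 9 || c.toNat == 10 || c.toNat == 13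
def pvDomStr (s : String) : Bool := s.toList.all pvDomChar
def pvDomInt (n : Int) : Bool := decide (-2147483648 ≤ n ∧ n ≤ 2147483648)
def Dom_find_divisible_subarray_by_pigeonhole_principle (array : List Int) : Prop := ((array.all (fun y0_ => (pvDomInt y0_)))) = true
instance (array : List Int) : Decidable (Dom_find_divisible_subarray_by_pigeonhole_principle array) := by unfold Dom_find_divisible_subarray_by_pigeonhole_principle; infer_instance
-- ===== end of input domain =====

-- B replaces A's per-iteration sum(array[:upper_bound]) by a running prefix-sum remainder
-- (one pass, O(1) per step), seeding the dict with {0: -1} so the zero-remainder case is the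
-- generic lookup.  Equivalence is proved on nonempty arrays (Python A returns None on []).

-- ===== PORT A =====
-- the loop 'for upper_bound in range(1, len(array)+1)' with early returns, as recursion
-- over the remaining list of upper bounds; falling off the loop (Python: return None) is
-- the [] case, excluded by Pre_.
def pvALoop (array : List Int) (length : Int) (d : PySem.Dict Int Int) :
    List Int → List Int
  | [] => []
  | ub :: rest =>
    let current_remainder := PySem.Int.mod (PySem.List.slice array none (some ub)).sum length
    if current_remainder = 0 then
      PySem.List.slice array none (some ub)
    else if d.getD current_remainder (-1) > -1 then
      -- '.get(current_remainder)' is guarded to be present, so it equals getD with any default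
      PySem.List.slice array (some (d.getD current_remainder (-1) + 1)) (some ub)
    else
      pvALoop array length (d.insert current_remainder (ub - 1)) rest

def find_divisible_subarray_by_pigeonhole_principle (array : List Int) : List Int :=
  let length : Int := array.length
  pvALoop array length PySem.Dict.empty (PySem.List.pyRange 1 (length + 1))

-- ===== PORT B =====
-- 'for i, x in enumerate(array)' with the running remainder and the seeded dict
def pvBLoop (array : List Int) (n : Int) (seen : PySem.Dict Int Int) (r : Int) :
    List (Int × Int) → List Int
  | [] => []
  | (i, x) :: rest =>
    let r' := PySem.Int.mod (r + x) n
    match seen.get? r' with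
    | some j => PySem.List.slice array (some (j + 1)) (some (i + 1))
    | none => pvBLoop array n (seen.insert r' i) r' rest

def find_divisible_subarray_by_pigeonhole_principle_alt (array : List Int) : List Int :=
  let n : Int := array.length
  pvBLoop array n (PySem.Dict.empty.insert 0 (-1)) 0 (PySem.List.enumerate array)

-- ===== PRECONDITION & SPEC =====
-- Pre_ excludes only the empty array, on which Python A (and B) fall off the loop and
-- return None, not a list.
def Pre_find_divisible_subarray_by_pigeonhole_principle (array : List Int) : Prop := array ≠ []
instance (array : List Int) : Decidable (Pre_find_divisible_subarray_by_pigeonhole_principle array) := by unfold Pre_find_divisible_subarray_by_pigeonhole_principle; infer_instance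
def pvWitness_find_divisible_subarray_by_pigeonhole_principle : List Int := [3, 1, 2]

def Spec_find_divisible_subarray_by_pigeonhole_principle (array : List Int) (out : List Int) : Prop := out = find_divisible_subarray_by_pigeonhole_principle_alt array
instance (array : List Int) (out : List Int) : Decidable (Spec_find_divisible_subarray_by_pigeonhole_principle array out) := by unfold Spec_find_divisible_subarray_by_pigeonhole_principle; infer_instance

-- ===== CLAIM (what is proved, stated in full; the proofs are below) =====
def Claim_equal_find_divisible_subarray_by_pigeonhole_principle : Prop := ∀ (array : List Int), Dom_find_divisible_subarray_by_pigeonhole_principle array → Pre_find_divisible_subarray_by_pigeonhole_principle array → Spec_find_divisible_subarray_by_pigeonhole_principle array (find_divisible_subarray_by_pigeonhole_principle array)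

-- ===== LEMMAS AND PROOFS =====

-- main simultaneous induction: after k loop steps without returning, A's state (its dict d)
-- and B's state (seen, running remainder r) are related, and the two loops agree.
lemma pvLoop_eq (array : List Int) :
    ∀ (m k : Nat), m = array.length - k →
    ∀ (d seen : PySem.Dict Int Int) (r : Int),
      (∀ x, seen.get? x = if x = 0 then some (-1) else d.get? x) →
      (∀ x j, d.get? x = some j → 0 ≤ j) →
      r = PySem.Int.mod ((array.take k).sum) (array.length : Int) →
      pvALoop array (array.length : Int) d (PySem.List.pyRange ((k : Int) + 1) ((array.length : Int) + 1))
        = pvBLoop array (array.length : Int) seen r (PySem.List.enumerate (array.drop k) (k : Int)) := by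
  intro m
  induction m with
  | zero =>
    intro k hm d seen r _ _ _
    have hk : array.length ≤ k := by omega
    have h1 : PySem.List.pyRange ((k : Int) + 1) ((array.length : Int) + 1) = [] := by
      rw [PySem.List.pyRange_one]
      simp
      omega
    have h2 : array.drop k = [] := List.drop_eq_nil_of_le hk
    rw [h1, h2]
    simp [pvALoop, pvBLoop, PySem.List.enumerate]
  | succ m ih =>
    intro k hm d seen r hseen hval hr
    have hk : k < array.length := by omega
    have hn : (0 : Int) < array.length := by omega
    have hcons : array.drop k = array[k] :: array.drop (k + 1) := List.drop_eq_getElem_cons hk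
    have hrange : PySem.List.pyRange ((k : Int) + 1) ((array.length : Int) + 1)
        = ((k : Int) + 1) :: PySem.List.pyRange (((k : Int) + 1) + 1) ((array.length : Int) + 1) :=
      PySem.List.pyRange_one_cons (by omega)
    have hslice : PySem.List.slice array none (some ((k : Int) + 1)) = array.take (k + 1) := by
      have := PySem.List.slice_to_natCast (xs := array) (b := k + 1)
      simpa using this
    have hsum : (array.take (k + 1)).sum = (array.take k).sum + array[k] :=
      List.sum_take_succ array k hk
    have hrA : PySem.Int.mod (r + array[k]) (array.length : Int)
        = PySem.Int.mod ((array.take (k + 1)).sum) (array.length : Int) := by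
      rw [hr, hsum, PySem.Int.mod_eq_emod_of_pos hn, PySem.Int.mod_eq_emod_of_pos hn,
        PySem.Int.mod_eq_emod_of_pos hn, Int.emod_add_emod]
    rw [hrange, hcons]
    simp only [PySem.List.enumerate, pvALoop, pvBLoop, hslice, hrA]
    set rA := PySem.Int.mod ((array.take (k + 1)).sum) (array.length : Int) with hrAdef
    by_cases h0 : rA = 0
    · rw [if_pos h0, h0, hseen]
      norm_num [hslice]
    · rw [if_neg h0]
      have hg := hseen rA
      rw [if_neg h0] at hg
      cases hd : d.get? rA with
      | some j =>
        have hj : (0 : Int) ≤ j := hval rA j hd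
        have hgd : d.getD rA (-1) = j := PySem.Dict.getD_of_get?_eq_some d (-1) hd
        rw [hg, hd, if_pos (by rw [hgd]; omega), hgd]
      | none =>
        have hgd : d.getD rA (-1) = -1 := PySem.Dict.getD_of_get?_eq_none d (-1) hd
        rw [if_neg (by rw [hgd]; omega), hg, hd]
        have hins : ((k : Int) + 1 - 1) = (k : Int) := by ring
        rw [hins]
        have h := ih (k + 1) (by omega) (d.insert rA (k : Int)) (seen.insert rA (k : Int)) rA
          (by intro x
              by_cases hx : x = 0
              · subst hx
                rw [PySem.Dict.get?_insert_of_ne _ _ (Ne.symm h0), PySem.Dict.get?_insert_of_ne _ _ (Ne.symm h0), hseen]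
              · by_cases hxr : x = rA
                · subst hxr
                  rw [PySem.Dict.get?_insert_self, PySem.Dict.get?_insert_self, if_neg hx]
                · rw [PySem.Dict.get?_insert_of_ne _ _ hxr, PySem.Dict.get?_insert_of_ne _ _ hxr,
                    hseen, if_neg hx]
          )
          (by intro x j hx
              by_cases hxr : x = rA
              · subst hxr
                rw [PySem.Dict.get?_insert_self] at hx
                cases hx
                omega
              · rw [PySem.Dict.get?_insert_of_ne _ _ hxr] at hx
                exact hval x j hx)
          (by rw [hrAdef])
        push_cast at h
        exact h

-- ===== VERDICT (by name: the statement is the Claim_ definition above) =====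
theorem find_divisible_subarray_by_pigeonhole_principle_spec : Claim_equal_find_divisible_subarray_by_pigeonhole_principle := by
  intro array _ hpre
  unfold Spec_find_divisible_subarray_by_pigeonhole_principle
  unfold find_divisible_subarray_by_pigeonhole_principle find_divisible_subarray_by_pigeonhole_principle_alt
  have h := pvLoop_eq array (array.length) 0 (by omega) PySem.Dict.empty
      (PySem.Dict.empty.insert 0 (-1)) 0
      (by intro x
          by_cases hx : x = 0
          · simp [hx, PySem.Dict.get?_insert_self]
          · simp [PySem.Dict.get?_insert_of_ne _ _ hx, PySem.Dict.get?_empty, hx])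
      (by intro x j h; simp [PySem.Dict.get?_empty] at h)
      (by simp [PySem.Int.mod])
  simpa using h
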